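-- pv_equiv track=rewrite | github.com/MrBrantCode/unitest_baseline | mut_generate/mist_train_cf/cf_20721/solution.py | sum_positive_even_numbers
-- ===== SOURCE A (Python) =====
-- def sum_positive_even_numbers(numbers):
--     unique_numbers = set()
--     total = 0
--
--     for number in numbers:
--         if number > 0 and number % 2 == 0 and number not in unique_numbers:
--             total += number
--             unique_numbers.add(number)
--
--     return total
-- ===== SOURCE B (Python) =====
-- def sum_positive_even_numbers(numbers):
--     evens = sorted(n for n in numbers if n > 0 and n % 2 == 0)
--     total = 0
--     prev = None
--     for n in evens:
--         if n != prev: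
--             total += n
--             prev = n
--     return total
-- ===== Notes on version B (the rewrite author's own statement) =====
-- stated objective: alternative
-- what changed: Replaces A's hash-set dedup in a single pass by a sort-then-scan algorithm: filter the positive evens, sort them, and sum while skipping adjacent duplicates (no set at all).
import Mathlib
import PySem

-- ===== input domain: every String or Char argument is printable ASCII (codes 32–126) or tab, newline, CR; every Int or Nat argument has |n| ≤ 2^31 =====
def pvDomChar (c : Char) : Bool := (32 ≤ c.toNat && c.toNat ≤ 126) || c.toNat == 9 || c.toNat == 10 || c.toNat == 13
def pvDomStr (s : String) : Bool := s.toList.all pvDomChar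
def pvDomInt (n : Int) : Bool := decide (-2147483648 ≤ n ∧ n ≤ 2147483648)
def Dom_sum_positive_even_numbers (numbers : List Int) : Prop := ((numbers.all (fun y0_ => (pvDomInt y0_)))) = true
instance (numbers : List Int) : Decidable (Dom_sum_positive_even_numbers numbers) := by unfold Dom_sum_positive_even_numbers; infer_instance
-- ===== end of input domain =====

-- B replaces A's single pass with a hash seen-set by a sort-then-scan algorithm:
-- filter the positive evens, sort, then sum skipping adjacent duplicates (alternative).


-- ===== PORT A =====
-- loop over `numbers`, carrying the seen-set `unique_numbers` and `total`
def sumPEN_loopA : List Int → PySem.Set Int → Int → Int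
  | [], _, total => total
  | number :: rest, uniqueNumbers, total =>
    if 0 < number ∧ PySem.Int.mod number 2 = 0 ∧ PySem.Set.contains uniqueNumbers number = false
    then sumPEN_loopA rest (PySem.Set.add uniqueNumbers number) (total + number)
    else sumPEN_loopA rest uniqueNumbers total

def sum_positive_even_numbers (numbers : List Int) : Int :=
  sumPEN_loopA numbers PySem.Set.empty 0

-- ===== PORT B =====
-- evens = sorted(n for n in numbers if n > 0 and n % 2 == 0);
-- then scan `evens` carrying `total` and `prev` (None initially), adding n when n != prev
def sumPEN_loopB : Option Int → Int → List Int → Int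
  | _, total, [] => total
  | prev, total, n :: rest =>
    if some n ≠ prev then sumPEN_loopB (some n) (total + n) rest
    else sumPEN_loopB prev total rest

def sum_positive_even_numbers_alt (numbers : List Int) : Int :=
  sumPEN_loopB none 0
    (PySem.List.sorted
      (numbers.filter (fun n => decide (0 < n) && decide (PySem.Int.mod n 2 = 0)))
      (fun x => x) false)

-- ===== PRECONDITION & SPEC =====
def Spec_sum_positive_even_numbers (numbers : List Int) (out : Int) : Prop := out = sum_positive_even_numbers_alt numbers
instance (numbers : List Int) (out : Int) : Decidable (Spec_sum_positive_even_numbers numbers out) := by unfold Spec_sum_positive_even_numbers; infer_instance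

-- ===== CLAIM (what is proved, stated in full; the proofs are below) =====
def Claim_equal_sum_positive_even_numbers : Prop := ∀ (numbers : List Int), Dom_sum_positive_even_numbers numbers → Spec_sum_positive_even_numbers numbers (sum_positive_even_numbers numbers)

-- ===== LEMMAS AND PROOFS =====

-- the predicate both programs test
def sumPEN_P (n : Int) : Bool := decide (0 < n) && decide (PySem.Int.mod n 2 = 0)

-- one unfolding step of A's loop
lemma sumPEN_loopA_cons (n : Int) (r : List Int) (s : PySem.Set Int) (t : Int) :
    sumPEN_loopA (n :: r) s t
      = if 0 < n ∧ PySem.Int.mod n 2 = 0 ∧ PySem.Set.contains s n = false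
        then sumPEN_loopA r (PySem.Set.add s n) (t + n)
        else sumPEN_loopA r s t := rfl

-- A-side invariant: A's loop adds exactly the new P-elements (first occurrences)
lemma sumPEN_loopA_eq (ns : List Int) : ∀ (s : PySem.Set Int) (t : Int),
    sumPEN_loopA ns s t + s.sum = t + (PySem.Set.update s (ns.filter sumPEN_P)).sum := by
  induction ns with
  | nil =>
    intro s t
    simp only [sumPEN_loopA, List.filter_nil, PySem.Set.update, List.foldl_nil]
  | cons n r ih =>
    intro s t
    by_cases hp : sumPEN_P n = true
    · have hp' : (0 < n ∧ PySem.Int.mod n 2 = 0) := by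
        simpa only [sumPEN_P, Bool.and_eq_true, decide_eq_true_eq] using hp
      rw [List.filter_cons_of_pos hp, PySem.Set.update_cons]
      by_cases hm : n ∈ s
      · have hc : PySem.Set.contains s n = true := by
          simpa [PySem.Set.contains] using hm
        have hadd : PySem.Set.add s n = s := by
          unfold PySem.Set.add; rw [if_pos hc]
        rw [sumPEN_loopA_cons,
            if_neg (fun hcond => by rw [hc] at hcond; exact absurd hcond.2.2 (by simp)),
            hadd]
        exact ih s t
      · have hc : PySem.Set.contains s n = false := by
          simpa [PySem.Set.contains] using hm
        have hadd : PySem.Set.add s n = s ++ [n] := by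
          unfold PySem.Set.add; rw [hc]; simp
        rw [sumPEN_loopA_cons, if_pos ⟨hp'.1, hp'.2, hc⟩]
        have h := ih (PySem.Set.add s n) (t + n)
        rw [hadd] at h ⊢
        simp only [List.sum_append, List.sum_cons, List.sum_nil] at h ⊢
        omega
    · have hp' : ¬ (0 < n ∧ PySem.Int.mod n 2 = 0) := by
        intro ⟨h1, h2⟩
        apply hp
        simp only [sumPEN_P, Bool.and_eq_true, decide_eq_true_eq]
        exact ⟨h1, h2⟩
      rw [List.filter_cons_of_neg (by simpa using hp), sumPEN_loopA_cons,
          if_neg (by tauto)]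
      exact ih s t

-- the list of values B's scan actually adds (adjacent-dedup of its input)
def sumPEN_ded : Option Int → List Int → List Int
  | _, [] => []
  | prev, n :: rest =>
    if some n ≠ prev then n :: sumPEN_ded (some n) rest else sumPEN_ded prev rest

-- B's scan sums exactly the adjacent-dedup of its input
lemma sumPEN_loopB_eq (ns : List Int) : ∀ (p : Option Int) (t : Int),
    sumPEN_loopB p t ns = t + (sumPEN_ded p ns).sum := by
  induction ns with
  | nil => intro p t; simp [sumPEN_loopB, sumPEN_ded]
  | cons n r ih =>
    intro p t
    by_cases h : some n ≠ p
    · simp only [sumPEN_loopB, sumPEN_ded, if_pos h, ih, List.sum_cons]; ring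
    · simp only [sumPEN_loopB, sumPEN_ded, if_neg h, ih]

-- on a sorted tail whose elements are all ≥ p, the adjacent-dedup after p is
-- strictly increasing and consists of exactly the elements ≠ p
lemma sumPEN_ded_some (ns : List Int) : ∀ (p : Int),
    (∀ x ∈ ns, p ≤ x) → ns.Pairwise (· ≤ ·) →
    (sumPEN_ded (some p) ns).Pairwise (· < ·) ∧
    (∀ y ∈ sumPEN_ded (some p) ns, p < y) ∧
    (∀ y, y ∈ sumPEN_ded (some p) ns ↔ y ∈ ns ∧ y ≠ p) := by
  induction ns with
  | nil => intro p _ _; simp [sumPEN_ded]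
  | cons n r ih =>
    intro p hge hpw
    have hpn : p ≤ n := hge n (List.mem_cons_self ..)
    have hrge : ∀ x ∈ r, n ≤ x := fun x hx => (List.pairwise_cons.mp hpw).1 x hx
    have hrpw : r.Pairwise (· ≤ ·) := (List.pairwise_cons.mp hpw).2
    by_cases h : n = p
    · subst h
      have hd : sumPEN_ded (some n) (n :: r) = sumPEN_ded (some n) r := by
        show (if some n ≠ some n then n :: sumPEN_ded (some n) r else sumPEN_ded (some n) r)
          = sumPEN_ded (some n) r
        rw [if_neg (fun h => h rfl)]
      have := ih n (fun x hx => hrge x hx) hrpw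
      refine ⟨?_, ?_, ?_⟩
      · rw [hd]; exact this.1
      · intro y hy
        exact this.2.1 y (by rw [hd] at hy; exact hy)
      · intro y
        rw [hd, (this.2.2 y)]
        constructor
        · rintro ⟨hy, hyn⟩; exact ⟨List.mem_cons_of_mem _ hy, hyn⟩
        · rintro ⟨hy, hyn⟩
          rcases List.mem_cons.mp hy with h | h
          · exact absurd h hyn
          · exact ⟨h, hyn⟩
    · have hlt : p < n := lt_of_le_of_ne hpn (fun e => h e.symm)
      have hded : sumPEN_ded (some p) (n :: r) = n :: sumPEN_ded (some n) r := by
        simp [sumPEN_ded, h]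
      have ihn := ih n hrge hrpw
      refine ⟨?_, ?_, ?_⟩
      · rw [hded]
        exact List.pairwise_cons.mpr ⟨fun y hy => ihn.2.1 y hy, ihn.1⟩
      · intro y hy
        rw [hded] at hy
        rcases List.mem_cons.mp hy with h' | h'
        · exact h' ▸ hlt
        · exact hlt.trans (ihn.2.1 y h')
      · intro y
        rw [hded]
        simp only [List.mem_cons, ihn.2.2 y]
        constructor
        · rintro (rfl | ⟨hy, hyn⟩)
          · exact ⟨Or.inl rfl, fun e => h e⟩
          · refine ⟨Or.inr hy, fun e => ?_⟩
            subst e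
            exact absurd (hrge _ hy) (not_le.mpr hlt)
        · rintro ⟨hy, hyp⟩
          rcases hy with rfl | hy
          · exact Or.inl rfl
          · by_cases hn : y = n
            · exact Or.inl hn
            · exact Or.inr ⟨hy, hn⟩

-- adjacent-dedup of a sorted list: strictly increasing, same membership
lemma sumPEN_ded_none (ns : List Int) (hpw : ns.Pairwise (· ≤ ·)) :
    (sumPEN_ded none ns).Pairwise (· < ·) ∧ (∀ y, y ∈ sumPEN_ded none ns ↔ y ∈ ns) := by
  cases ns with
  | nil => simp [sumPEN_ded]
  | cons n r =>
    have hrge : ∀ x ∈ r, n ≤ x := fun x hx => (List.pairwise_cons.mp hpw).1 x hx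
    have hrpw : r.Pairwise (· ≤ ·) := (List.pairwise_cons.mp hpw).2
    have h := sumPEN_ded_some r n hrge hrpw
    have hded : sumPEN_ded none (n :: r) = n :: sumPEN_ded (some n) r := by
      simp [sumPEN_ded]
    rw [hded]
    refine ⟨List.pairwise_cons.mpr ⟨fun y hy => h.2.1 y hy, h.1⟩, fun y => ?_⟩
    simp only [List.mem_cons, h.2.2 y]
    constructor
    · rintro (rfl | ⟨hy, _⟩)
      · exact Or.inl rfl
      · exact Or.inr hy
    · rintro (rfl | hy)
      · exact Or.inl rfl
      · by_cases hn : y = n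
        · exact Or.inl hn
        · exact Or.inr ⟨hy, hn⟩

-- ===== VERDICT (by name: the statement is the Claim_ definition above) =====
theorem sum_positive_even_numbers_spec : Claim_equal_sum_positive_even_numbers := by
  intro numbers _
  unfold Spec_sum_positive_even_numbers sum_positive_even_numbers sum_positive_even_numbers_alt
  set f := numbers.filter (fun n => decide (0 < n) && decide (PySem.Int.mod n 2 = 0)) with hf
  have hA := sumPEN_loopA_eq numbers PySem.Set.empty 0
  simp only [PySem.Set.empty, List.sum_nil, add_zero, zero_add] at hA
  have hfP : numbers.filter sumPEN_P = f := rfl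
  rw [hfP] at hA
  -- A's value = sum of set(f), PySem.Set.update [] f = Set.ofList f
  have hAs : sumPEN_loopA numbers [] 0 = (PySem.Set.ofList f).sum := hA
  -- B's value = sum of the adjacent-dedup of sorted(f)
  set sf := PySem.List.sorted f (fun x => x) false with hsf
  have hpw : sf.Pairwise (· ≤ ·) := PySem.List.sorted_pairwise f (fun x => x)
  have hded := sumPEN_ded_none sf hpw
  have hBs : sumPEN_loopB none 0 sf = (sumPEN_ded none sf).sum := by
    simpa using sumPEN_loopB_eq sf none 0
  -- both summand lists are nodup with the same membership, hence permutations
  have hnd1 : (PySem.Set.ofList f).Nodup := PySem.Set.nodup_ofList f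
  have hnd2 : (sumPEN_ded none sf).Nodup := hded.1.nodup
  have hmem : ∀ y, y ∈ PySem.Set.ofList f ↔ y ∈ sumPEN_ded none sf := by
    intro y
    rw [PySem.Set.mem_ofList, hded.2 y, hsf, PySem.List.mem_sorted]
  have hperm : (PySem.Set.ofList f).Perm (sumPEN_ded none sf) :=
    (List.perm_ext_iff_of_nodup hnd1 hnd2).mpr hmem
  have hempty : (PySem.Set.empty : PySem.Set Int) = [] := rfl
  rw [hempty, hAs, hBs, hperm.sum_eq]
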